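-- pv_equiv track=rewrite | github.com/SNTSVV/OPAM | scripts/Python/ScheduleStats.py | calculate_fc
-- ===== SOURCE A (Python) =====
-- def calculate_fc(tasks, priorities):
--     pMin = 0
--     for t in range(0, len(priorities)):
--         if tasks[t]['Type'] == 'Aperiodic': continue
--         if priorities[t] > pMin:
--             pMin = priorities[t]
--     fc = 0
--     for t in range(0, len(priorities)):
--         if tasks[t]['Type'] != 'Aperiodic': continue
--         fc += (priorities[t] - pMin)
--     return fc
-- ===== SOURCE B (Python) =====
-- def calculate_fc(tasks, priorities):
--     apSum = 0
--     apCount = 0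
--     pMin = 0
--     for t in range(len(priorities)):
--         p = priorities[t]
--         if tasks[t]['Type'] == 'Aperiodic':
--             apSum += p
--             apCount += 1
--         elif p > pMin:
--             pMin = p
--     return apSum - apCount * pMin
-- ===== Notes on version B (the rewrite author's own statement) =====
-- stated objective: alternative
-- what changed: Replaced A's two dependent passes (first compute the periodic-priority max, then sum each aperiodic offset against it) by a single pass keeping sum, count and running max, returning apSum - apCount*pMin via the identity Sum(p - m) = Sum(p) - count*m.
import Mathlib
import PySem

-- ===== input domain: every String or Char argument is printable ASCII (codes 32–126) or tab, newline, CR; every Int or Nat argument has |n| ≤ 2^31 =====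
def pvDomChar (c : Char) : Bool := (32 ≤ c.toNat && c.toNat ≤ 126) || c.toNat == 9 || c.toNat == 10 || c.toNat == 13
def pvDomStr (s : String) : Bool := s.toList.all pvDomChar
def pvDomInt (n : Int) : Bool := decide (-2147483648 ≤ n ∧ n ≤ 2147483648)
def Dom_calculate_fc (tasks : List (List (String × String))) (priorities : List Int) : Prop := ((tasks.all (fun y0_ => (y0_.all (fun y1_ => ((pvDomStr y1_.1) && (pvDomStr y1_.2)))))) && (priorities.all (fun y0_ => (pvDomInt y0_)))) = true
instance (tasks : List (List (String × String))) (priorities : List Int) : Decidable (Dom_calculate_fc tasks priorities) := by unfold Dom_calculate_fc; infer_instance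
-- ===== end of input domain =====

-- B replaces A's two dependent passes by one pass keeping (apSum, apCount, pMin) and returns
-- apSum - apCount*pMin via Sum(p-m)=Sum(p)-count*m; objective: alternative (one traversal instead of two).

-- ===== PORT A =====
-- tasks[t]['Type'] (total form; Pre_ guarantees the index is in range and the key is present)
def pvTy (tasks : List (List (String × String))) (t : Int) : String :=
  PySem.Dict.getD (PySem.Dict.mk ((PySem.List.pyGet? tasks t).getD [])) "Type" ""
-- priorities[t] (total form; Pre_ guarantees the index is in range)
def pvPr (priorities : List Int) (t : Int) : Int :=
  (PySem.List.pyGet? priorities t).getD 0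
-- body of A's first loop
def stepP (tasks : List (List (String × String))) (priorities : List Int) (pMin t : Int) : Int :=
  if pvTy tasks t = "Aperiodic" then pMin
  else if pvPr priorities t > pMin then pvPr priorities t else pMin
-- body of A's second loop (pMin fixed)
def stepF (tasks : List (List (String × String))) (priorities : List Int) (pMin fc t : Int) : Int :=
  if pvTy tasks t ≠ "Aperiodic" then fc else fc + (pvPr priorities t - pMin)

def calculate_fc (tasks : List (List (String × String))) (priorities : List Int) : Int :=
  let pMin := (PySem.List.pyRange 0 priorities.length 1).foldl (stepP tasks priorities) 0
  (PySem.List.pyRange 0 priorities.length 1).foldl (stepF tasks priorities pMin) 0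

-- ===== PORT B =====
-- body of B's single loop over (apSum, apCount, pMin)
def stepB (tasks : List (List (String × String))) (priorities : List Int)
    (st : Int × Int × Int) (t : Int) : Int × Int × Int :=
  let p := pvPr priorities t
  if pvTy tasks t = "Aperiodic" then (st.1 + p, st.2.1 + 1, st.2.2)
  else if p > st.2.2 then (st.1, st.2.1, p) else st

def calculate_fc_alt (tasks : List (List (String × String))) (priorities : List Int) : Int :=
  let st := (PySem.List.pyRange 0 priorities.length 1).foldl (stepB tasks priorities) (0, 0, 0)
  st.1 - st.2.1 * st.2.2

-- ===== PRECONDITION & SPEC =====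
-- Pre_ excludes exactly the inputs where Python A raises: an index t < len(priorities) with
-- t ≥ len(tasks) (IndexError) or with no 'Type' key in tasks[t] (KeyError).
def Pre_calculate_fc (tasks : List (List (String × String))) (priorities : List Int) : Prop :=
  priorities.length ≤ tasks.length ∧
  ∀ d ∈ tasks.take priorities.length, (PySem.Dict.mk d).contains "Type" = true
instance (tasks : List (List (String × String))) (priorities : List Int) : Decidable (Pre_calculate_fc tasks priorities) := by unfold Pre_calculate_fc; infer_instance

def pvWitness_calculate_fc : (List (List (String × String))) × List Int :=
  ([[("Type", "Aperiodic")], [("Type", "Periodic")]], [3, 5])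

def Spec_calculate_fc (tasks : List (List (String × String))) (priorities : List Int) (out : Int) : Prop := out = calculate_fc_alt tasks priorities
instance (tasks : List (List (String × String))) (priorities : List Int) (out : Int) : Decidable (Spec_calculate_fc tasks priorities out) := by unfold Spec_calculate_fc; infer_instance

-- ===== CLAIM (what is proved, stated in full; the proofs are below) =====
def Claim_equal_calculate_fc : Prop := ∀ (tasks : List (List (String × String))) (priorities : List Int), Dom_calculate_fc tasks priorities → Pre_calculate_fc tasks priorities → Spec_calculate_fc tasks priorities (calculate_fc tasks priorities)

-- ===== LEMMAS AND PROOFS =====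

-- sum of priorities of aperiodic indices in L
def apS (tasks : List (List (String × String))) (priorities : List Int) : List Int → Int
  | [] => 0
  | t :: L => (if pvTy tasks t = "Aperiodic" then pvPr priorities t else 0) + apS tasks priorities L

-- number of aperiodic indices in L
def apC (tasks : List (List (String × String))) (priorities : List Int) : List Int → Int
  | [] => 0
  | t :: L => (if pvTy tasks t = "Aperiodic" then 1 else 0) + apC tasks priorities L

theorem foldF_eq (tasks : List (List (String × String))) (priorities : List Int)
    (L : List Int) : ∀ (M fc : Int),
    L.foldl (stepF tasks priorities M) fc
      = fc + apS tasks priorities L - apC tasks priorities L * M := by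
  induction L with
  | nil => intro M fc; simp [apS, apC]
  | cons t L ih =>
    intro M fc
    by_cases h : pvTy tasks t = "Aperiodic" <;>
      simp [List.foldl, stepF, apS, apC, h, ih] <;> ring

theorem foldB_eq (tasks : List (List (String × String))) (priorities : List Int)
    (L : List Int) : ∀ (s c m : Int),
    L.foldl (stepB tasks priorities) (s, c, m)
      = (s + apS tasks priorities L, c + apC tasks priorities L,
         L.foldl (stepP tasks priorities) m) := by
  induction L with
  | nil => intro s c m; simp [apS, apC]
  | cons t L ih =>
    intro s c m
    by_cases h : pvTy tasks t = "Aperiodic"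
    · simp [List.foldl, stepB, stepP, apS, apC, h, ih]; constructor <;> ring
    · by_cases hp : pvPr priorities t > m <;>
        simp [List.foldl, stepB, stepP, apS, apC, h, hp, ih]

-- ===== VERDICT (by name: the statement is the Claim_ definition above) =====
theorem calculate_fc_spec : Claim_equal_calculate_fc := by
  intro tasks priorities _ _
  unfold Spec_calculate_fc calculate_fc calculate_fc_alt
  rw [foldF_eq, foldB_eq]
  ring
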